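-- pv_equiv track=rewrite | github.com/nutthapong-patchotchai/Swift-Dynamics-Test | 3_number_to_thai/main.py | number_to_thai
-- ===== SOURCE A (Python) =====
-- def number_to_thai(number: int) -> str:
--     if number < 0:
--         return "number can not less than 0"
--     if number > 1000:
--         return "number exceeds maximum limit"
--
--     thai_numerals = ["ศูนย์", "หนึ่ง", "สอง", "สาม", "สี่", "ห้า", "หก", "เจ็ด", "แปด", "เก้า"]
--     thai_units = ["", "สิบ", "ร้อย", "พัน"]
--
--     def convert_to_thai_text(num):
--         if num == 0:
--             return thai_numerals[0]
--
--         result = ""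
--         num_str = str(num)
--         length = len(num_str)
--
--         for i, digit in enumerate(num_str):
--             digit_int = int(digit)
--             if digit_int != 0:
--                 if digit_int == 1:
--                     if i == length - 1:
--                         result += "เอ็ด"
--                     elif i == length - 2:
--                         result += ""
--                     else:
--                         result += thai_numerals[digit_int]
--                 elif digit_int == 2 and i == length - 2:
--                     result += "ยี่"
--                 else:
--                     result += thai_numerals[digit_int]
--
--                 result += thai_units[length - i - 1]
--
--         return result
--
--     return convert_to_thai_text(number)
-- ===== SOURCE B (Python) =====
-- def number_to_thai(number: int) -> str:
--     if number < 0: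
--         return "number can not less than 0"
--     if number > 1000:
--         return "number exceeds maximum limit"
--     if number == 0:
--         return "ศูนย์"
--     numerals = ["ศูนย์", "หนึ่ง", "สอง", "สาม", "สี่", "ห้า", "หก", "เจ็ด", "แปด", "เก้า"]
--     th, h, t, o = number // 1000, number // 100 % 10, number // 10 % 10, number % 10
--     parts = []
--     if th:
--         parts.append(numerals[th] + "พัน")
--     if h:
--         parts.append(numerals[h] + "ร้อย")
--     if t == 1:
--         parts.append("สิบ")
--     elif t == 2:
--         parts.append("ยี่สิบ")
--     elif t:
--         parts.append(numerals[t] + "สิบ")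
--     if o == 1:
--         parts.append("เอ็ด")
--     elif o:
--         parts.append(numerals[o])
--     return "".join(parts)
-- ===== Notes on version B (the rewrite author's own statement) =====
-- stated objective: simpler
-- what changed: Replaces the string-of-digits enumeration loop (str(num), per-character int() parsing, positional unit indexing) with a direct arithmetic extraction of the four place digits and one straight-line append per non-zero place.
import Mathlib
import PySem

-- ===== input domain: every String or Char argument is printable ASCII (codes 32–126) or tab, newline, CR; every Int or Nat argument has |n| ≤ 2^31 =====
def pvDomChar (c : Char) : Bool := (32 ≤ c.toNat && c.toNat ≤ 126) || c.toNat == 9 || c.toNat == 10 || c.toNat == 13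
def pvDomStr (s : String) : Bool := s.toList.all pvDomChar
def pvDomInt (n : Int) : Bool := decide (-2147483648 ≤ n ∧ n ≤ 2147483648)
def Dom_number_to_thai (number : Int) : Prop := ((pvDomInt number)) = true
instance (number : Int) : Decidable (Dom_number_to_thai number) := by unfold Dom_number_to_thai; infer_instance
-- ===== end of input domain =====

-- B replaces A's str()-enumeration loop by arithmetic extraction of the four place digits; objective: simpler.

-- ===== PORT A =====
def thaiNumeralsA : List (List Char) :=
  ["ศูนย์".toList, "หนึ่ง".toList, "สอง".toList, "สาม".toList, "สี่".toList,
   "ห้า".toList, "หก".toList, "เจ็ด".toList, "แปด".toList, "เก้า".toList]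

def thaiUnitsA : List (List Char) := ["".toList, "สิบ".toList, "ร้อย".toList, "พัน".toList]

-- list indexing thai_numerals[d] / thai_units[k]: indices are always in range here (0 ≤ d ≤ 9,
-- 0 ≤ k ≤ 3 for 0 ≤ number ≤ 1000), so pyGetD with a dummy default is exact.
def convertToThaiTextA (num : Int) : List Char :=
  if num = 0 then PySem.List.pyGetD thaiNumeralsA 0 []
  else
    let num_str := PySem.Int.toChars num
    let length : Int := num_str.length
    (PySem.List.enumerate num_str).foldl (fun result p =>
      let i := p.1
      let digit := p.2
      -- int(digit): digit is one character of str(num); exact via PySem.Int.ofChars?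
      let digit_int : Int := (PySem.Int.ofChars? [digit]).getD 0
      if digit_int ≠ 0 then
        let result :=
          if digit_int = 1 then
            if i = length - 1 then result ++ "เอ็ด".toList
            else if i = length - 2 then result
            else result ++ PySem.List.pyGetD thaiNumeralsA digit_int []
          else if digit_int = 2 ∧ i = length - 2 then result ++ "ยี่".toList
          else result ++ PySem.List.pyGetD thaiNumeralsA digit_int []
        result ++ PySem.List.pyGetD thaiUnitsA (length - i - 1) []
      else result) []

def number_to_thai (number : Int) : String :=
  if number < 0 then "number can not less than 0"
  else if number > 1000 then "number exceeds maximum limit"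
  else String.ofList (convertToThaiTextA number)

-- ===== PORT B =====
def thaiNumeralsB : List (List Char) :=
  ["ศูนย์".toList, "หนึ่ง".toList, "สอง".toList, "สาม".toList, "สี่".toList,
   "ห้า".toList, "หก".toList, "เจ็ด".toList, "แปด".toList, "เก้า".toList]

def number_to_thai_alt (number : Int) : String :=
  if number < 0 then "number can not less than 0"
  else if number > 1000 then "number exceeds maximum limit"
  else if number = 0 then "ศูนย์"
  else
    let th := PySem.Int.floordiv number 1000
    let h := PySem.Int.mod (PySem.Int.floordiv number 100) 10
    let t := PySem.Int.mod (PySem.Int.floordiv number 10) 10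
    let o := PySem.Int.mod number 10
    let parts : List (List Char) :=
      (if th ≠ 0 then [PySem.List.pyGetD thaiNumeralsB th [] ++ "พัน".toList] else []) ++
      (if h ≠ 0 then [PySem.List.pyGetD thaiNumeralsB h [] ++ "ร้อย".toList] else []) ++
      (if t = 1 then ["สิบ".toList]
       else if t = 2 then ["ยี่สิบ".toList]
       else if t ≠ 0 then [PySem.List.pyGetD thaiNumeralsB t [] ++ "สิบ".toList] else []) ++
      (if o = 1 then ["เอ็ด".toList]
       else if o ≠ 0 then [PySem.List.pyGetD thaiNumeralsB o []] else [])
    String.ofList parts.flatten  -- "".join(parts)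

-- ===== PRECONDITION & SPEC =====
def Spec_number_to_thai (number : Int) (out : String) : Prop := out = number_to_thai_alt number
instance (number : Int) (out : String) : Decidable (Spec_number_to_thai number out) := by unfold Spec_number_to_thai; infer_instance

-- ===== CLAIM (what is proved, stated in full; the proofs are below) =====
def Claim_equal_number_to_thai : Prop := ∀ (number : Int), Dom_number_to_thai number → Spec_number_to_thai number (number_to_thai number)

-- ===== LEMMAS AND PROOFS =====
set_option maxRecDepth 40000 in
set_option maxHeartbeats 4000000 in
theorem agree_in_range : ∀ n : Nat, n < 1001 → number_to_thai (n : Int) = number_to_thai_alt (n : Int) := by decide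

-- ===== VERDICT (by name: the statement is the Claim_ definition above) =====
theorem number_to_thai_spec : Claim_equal_number_to_thai := by
  intro number _
  show number_to_thai number = number_to_thai_alt number
  by_cases hneg : number < 0
  · simp [number_to_thai, number_to_thai_alt, hneg]
  · by_cases hbig : number > 1000
    · simp [number_to_thai, number_to_thai_alt, hneg, hbig]
    · have h0 : (number.toNat : Int) = number := Int.toNat_of_nonneg (by omega)
      have hlt : number.toNat < 1001 := by omega
      have := agree_in_range number.toNat hlt
      rwa [h0] at this
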